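-- pv_equiv track=rewrite | github.com/TerryLun/Code-Playground | Leetcode Problems/lc205e.py | convert
-- ===== SOURCE A (Python) =====
-- def convert(s):
--     track = {}
--     count = 33
--     for i in range(len(s)):
--         c = s[i]
--         if ord(c) - ord('0') not in track.keys():
--             s = s[:i] + chr(count) + s[i + 1:]
--             track[ord(c) - ord('0')] = chr(count)
--             count += 1
--         else:
--             s = s[:i] + track[ord(c) - ord('0')] + s[i + 1:]
--     return s
-- ===== SOURCE B (Python) =====
-- def convert(s):
--     unique = list(dict.fromkeys(s))
--     mapping = {c: chr(33 + i) for i, c in enumerate(unique)}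
--     return ''.join(mapping[c] for c in s)
-- ===== Notes on version B (the rewrite author's own statement) =====
-- stated objective: faster
-- what changed: A interleaves a per-index dict membership test with rebuilding the whole string by slicing at every position; B makes three separate passes: extract the distinct characters in first-appearance order, build the full code map in one comprehension, then substitute in a single join.
import Mathlib
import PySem

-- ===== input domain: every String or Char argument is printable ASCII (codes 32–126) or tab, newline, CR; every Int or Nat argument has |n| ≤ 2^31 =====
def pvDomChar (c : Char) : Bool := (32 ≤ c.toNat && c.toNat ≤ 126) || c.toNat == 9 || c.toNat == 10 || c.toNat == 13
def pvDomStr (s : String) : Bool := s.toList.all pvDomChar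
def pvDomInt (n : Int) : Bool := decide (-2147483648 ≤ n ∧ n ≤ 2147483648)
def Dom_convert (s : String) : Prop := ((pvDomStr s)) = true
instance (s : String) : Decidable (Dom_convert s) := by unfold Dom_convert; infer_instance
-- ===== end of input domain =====

-- B relabels by first appearance in three separate passes (distinct chars, code map, substitution)
-- instead of A's interleaved per-index membership-check-and-slice-rebuild; same return value.

-- ===== PORT A =====
-- ord(c) - ord('0'), the key expression A uses for its dict
def keyOf (c : Char) : Int := (c.toNat : Int) - 48

-- one iteration of A's 'for i in range(len(s))' body; state = (s as chars, track, count).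
-- l.getD i ' ' is s[i] (i is always in range here); track[...] in the else-branch is
-- (get? ...).getD ' ' — the key is present in that branch, so the default is never used.
def convertStep (st : List Char × PySem.Dict Int Char × Int) (i : Nat) :
    List Char × PySem.Dict Int Char × Int :=
  let l := st.1
  let track := st.2.1
  let count := st.2.2
  let c := l.getD i ' '
    if track.contains (keyOf c) = false then
      (l.take i ++ Char.ofNat count.toNat :: l.drop (i + 1),
       track.insert (keyOf c) (Char.ofNat count.toNat), count + 1)
    else
      (l.take i ++ ((track.get? (keyOf c)).getD ' ') :: l.drop (i + 1), track, count)


def convert (s : String) : String :=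
  String.ofList ((List.range s.toList.length).foldl convertStep
    (s.toList, PySem.Dict.empty, 33)).1

-- ===== PORT B =====
-- unique = list(dict.fromkeys(s)); mapping built by the comprehension (a fold of inserts over
-- enumerate(unique)); mapping[c] is (get? ...).getD ' ' — every c of s is a key, default unused.
def convert_alt (s : String) : String :=
  let unique := PySem.List.dedup s.toList
  let mapping : PySem.Dict Char Char :=
    (PySem.List.enumerate unique 0).foldl
      (fun d ic => d.insert ic.2 (Char.ofNat ((33 + ic.1).toNat))) PySem.Dict.empty
  String.ofList (s.toList.map (fun c => (mapping.get? c).getD ' '))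

-- ===== PRECONDITION & SPEC =====
def Spec_convert (s : String) (out : String) : Prop := out = convert_alt s
instance (s : String) (out : String) : Decidable (Spec_convert s out) := by unfold Spec_convert; infer_instance

-- ===== CLAIM (what is proved, stated in full; the proofs are below) =====
def Claim_equal_convert : Prop := ∀ (s : String), Dom_convert s → Spec_convert s (convert s)

-- ===== LEMMAS AND PROOFS =====

-- the relabelling both programs compute, relative to the full input, and A's 'track' contents
def relabel (orig : List Char) (c : Char) : Char :=
  Char.ofNat (33 + (PySem.List.dedup orig).idxOf c)

def trackOf (p : List Char) : PySem.Dict Int Char :=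
  PySem.Dict.mk (((PySem.List.dedup p).zipIdx).map
    (fun cj => (keyOf cj.1, Char.ofNat (33 + cj.2))))


theorem keyOf_inj {a b : Char} (h : keyOf a = keyOf b) : a = b := by
  unfold keyOf at h
  have h2 : a.toNat = b.toNat := by omega
  rw [← Char.ofNat_toNat a, ← Char.ofNat_toNat b, h2]
theorem get?_mkTrack (u : List Char) (k : Nat) (c : Char) (hnd : u.Nodup) :
    (PySem.Dict.mk ((u.zipIdx k).map (fun cj => (keyOf cj.1, Char.ofNat (33 + cj.2))))).get? (keyOf c)
      = if c ∈ u then some (Char.ofNat (33 + (k + u.idxOf c))) else none := by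
  induction u generalizing k with
  | nil => simp [PySem.Dict.get?]
  | cons a u ih =>
    rw [List.zipIdx_cons, List.map_cons, PySem.Dict.get?_mk_cons]
    by_cases hac : a = c
    · subst hac
      simp [keyOf]
    · have hk : (keyOf a == keyOf c) = false := by
        simp only [beq_eq_false_iff_ne, ne_eq]
        intro h; exact hac (keyOf_inj h)
      rw [hk]
      simp only [Bool.false_eq_true, if_false]
      rw [ih (k+1) (by exact hnd.of_cons)]
      have hbeq : (a == c) = false := by simp [hac]
      by_cases hc : c ∈ u
      · simp only [hc, if_true, List.mem_cons, or_true, List.idxOf_cons, hbeq, cond_false]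
        congr 2
        omega
      · simp [hc, Ne.symm hac]

theorem getD_append_len (xs ys : List Char) (y : Char) (d : Char) :
    (xs ++ y :: ys).getD xs.length d = y := by
  simp [List.getD_eq_getElem?_getD, List.getElem?_append_right (Nat.le_refl _)]

theorem drop_append_len_succ (xs ys : List Char) (y : Char) :
    (xs ++ y :: ys).drop (xs.length + 1) = ys := by
  rw [show xs ++ y :: ys = (xs ++ [y]) ++ ys by simp,
      show xs.length + 1 = (xs ++ [y]).length by simp, List.drop_left]

theorem idxOf_append_left {c : Char} (l t : List Char) (hc : c ∈ l) :
    (l ++ t).idxOf c = l.idxOf c := by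
  induction l with
  | nil => simp at hc
  | cons a l ih =>
    by_cases h : a = c
    · simp [List.idxOf_cons, h]
    · have : c ∈ l := by simpa [Ne.symm h] using hc
      simp [List.idxOf_cons, (by simp [h] : (a == c) = false), ih this]

theorem idxOf_append_self {c : Char} (l t : List Char) (hc : c ∉ l) :
    (l ++ c :: t).idxOf c = l.length := by
  induction l with
  | nil => simp
  | cons a l ih =>
    have h : a ≠ c := fun h => hc (by simp [h])
    have : c ∉ l := fun h => hc (by simp [h])
    simp [List.idxOf_cons, (by simp [h] : (a == c) = false), ih this]

theorem dedup_append_singleton (p : List Char) (c : Char) :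
    PySem.List.dedup (p ++ [c]) =
      if c ∈ PySem.List.dedup p then PySem.List.dedup p
      else PySem.List.dedup p ++ [c] := by
  simp [PySem.List.dedup, PySem.Set.ofList_eq_foldl, List.foldl_append, PySem.Set.add,
        PySem.Set.contains]

theorem dedup_prefix (p q : List Char) :
    PySem.List.dedup p <+: PySem.List.dedup (p ++ q) := by
  induction q using List.reverseRecOn with
  | nil => simp
  | append_singleton q c ih =>
    rw [show p ++ (q ++ [c]) = (p ++ q) ++ [c] by simp, dedup_append_singleton]
    split
    · exact ih
    · exact ih.trans (List.prefix_append _ _)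


theorem get?_trackOf (p : List Char) (c : Char) :
    (trackOf p).get? (keyOf c) =
      if c ∈ PySem.List.dedup p
      then some (Char.ofNat (33 + (PySem.List.dedup p).idxOf c)) else none := by
  unfold trackOf
  rw [get?_mkTrack _ 0 _ (PySem.List.nodup_dedup _)]
  simp

theorem trackOf_append_mem (p : List Char) (c : Char) (hc : c ∈ PySem.List.dedup p) :
    trackOf (p ++ [c]) = trackOf p := by
  unfold trackOf
  rw [dedup_append_singleton, if_pos hc]

theorem trackOf_append_not_mem (p : List Char) (c : Char) (hc : c ∉ PySem.List.dedup p) :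
    trackOf (p ++ [c]) =
      (trackOf p).insert (keyOf c) (Char.ofNat (33 + (PySem.List.dedup p).length)) := by
  have hcont : (trackOf p).contains (keyOf c) = false := by
    rw [PySem.Dict.contains_eq_isSome_get?, get?_trackOf, if_neg hc]
    rfl
  apply PySem.Dict.ext
  rw [PySem.Dict.items_insert_of_not_contains (h := hcont)]
  unfold trackOf
  rw [dedup_append_singleton, if_neg hc]
  simp [List.zipIdx_append, PySem.Dict.items]


theorem loop_inv (orig : List Char) :
    ∀ (rest p : List Char), p ++ rest = orig →
      (List.range' p.length rest.length).foldl convertStep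
          (p.map (relabel orig) ++ rest, trackOf p,
           33 + ((PySem.List.dedup p).length : Int))
        = (orig.map (relabel orig), trackOf orig,
           33 + ((PySem.List.dedup orig).length : Int)) := by
  intro rest
  induction rest with
  | nil => intro p h; rw [List.append_nil] at h; subst h; simp
  | cons c rest ih =>
    intro p h
    have hpre : PySem.List.dedup (p ++ [c]) <+: PySem.List.dedup orig := by
      rw [← h, show p ++ c :: rest = (p ++ [c]) ++ rest by simp]
      exact dedup_prefix _ _
    have hget : (p.map (relabel orig) ++ c :: rest).getD (p.map (relabel orig)).length ' ' = c :=
      getD_append_len _ _ _ _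
    have hlen : (p.map (relabel orig)).length = p.length := by simp
    have htake : (p.map (relabel orig) ++ c :: rest).take p.length = p.map (relabel orig) := by
      rw [← hlen]; exact List.take_left
    have hdrop : (p.map (relabel orig) ++ c :: rest).drop (p.length + 1) = rest := by
      rw [← hlen]; exact drop_append_len_succ _ _ _
    have hstep : convertStep (p.map (relabel orig) ++ c :: rest, trackOf p,
          33 + ((PySem.List.dedup p).length : Int)) p.length
        = ((p ++ [c]).map (relabel orig) ++ rest, trackOf (p ++ [c]),
           33 + ((PySem.List.dedup (p ++ [c])).length : Int)) := by
      unfold convertStep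
      dsimp only
      rw [show (p.map (relabel orig) ++ c :: rest).getD p.length ' ' = c from by
        rw [← hlen]; exact getD_append_len _ _ _ _]
      by_cases hc : c ∈ PySem.List.dedup p
      · have hcont : (trackOf p).contains (keyOf c) = true := by
          rw [PySem.Dict.contains_eq_isSome_get?, get?_trackOf, if_pos hc]; rfl
        rw [hcont]
        simp only [Bool.true_eq_false, if_false]
        rw [get?_trackOf, if_pos hc]
        have hidx : (PySem.List.dedup orig).idxOf c = (PySem.List.dedup p).idxOf c := by
          obtain ⟨t, ht⟩ := hpre
          rw [dedup_append_singleton, if_pos hc] at ht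
          rw [← ht]; exact idxOf_append_left _ _ hc
        have hrel : Char.ofNat (33 + (PySem.List.dedup p).idxOf c) = relabel orig c := by
          unfold relabel; rw [hidx]
        rw [htake, hdrop, trackOf_append_mem _ _ hc,
            dedup_append_singleton, if_pos hc]
        simp only [Option.getD_some, List.map_append, List.map_cons, List.map_nil,
          List.append_assoc, List.singleton_append, hrel]
      · have hcont : (trackOf p).contains (keyOf c) = false := by
          rw [PySem.Dict.contains_eq_isSome_get?, get?_trackOf, if_neg hc]; rfl
        rw [hcont]
        simp only [if_pos rfl]
        have hcount : (33 + ((PySem.List.dedup p).length : Int)).toNat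
            = 33 + (PySem.List.dedup p).length := by omega
        have hidx : (PySem.List.dedup orig).idxOf c = (PySem.List.dedup p).length := by
          obtain ⟨t, ht⟩ := hpre
          rw [dedup_append_singleton, if_neg hc] at ht
          rw [← ht, List.append_assoc, List.singleton_append]
          exact idxOf_append_self _ _ hc
        have hrel : Char.ofNat (33 + (PySem.List.dedup p).length) = relabel orig c := by
          unfold relabel; rw [hidx]
        rw [htake, hdrop, hcount, hrel, trackOf_append_not_mem _ _ hc,
            dedup_append_singleton, if_neg hc]
        have : ((PySem.List.dedup p ++ [c]).length : Int)
            = ((PySem.List.dedup p).length : Int) + 1 := by simp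
        rw [this]
        simp only [if_true, List.map_append, List.map_cons, List.map_nil, List.append_assoc,
          List.singleton_append, hrel, Prod.mk.injEq]
        exact ⟨trivial, trivial, by ring⟩
    rw [List.length_cons, List.range'_succ, List.foldl_cons, hstep,
        show p.length + 1 = (p ++ [c]).length by simp]
    exact ih (p ++ [c]) (by simpa using h)

theorem convert_eq (s : String) :
    convert s = String.ofList (s.toList.map (relabel s.toList)) := by
  unfold convert
  have h0 : trackOf [] = PySem.Dict.empty := rfl
  have := loop_inv s.toList s.toList [] (by simp)
  rw [h0] at this
  simp only [List.length_nil, List.map_nil, List.nil_append] at this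
  rw [List.range_eq_range']
  rw [show ((PySem.List.dedup ([] : List Char)).length : Int) = 0 from rfl] at this
  rw [show (33 : Int) + 0 = 33 from by ring] at this
  rw [this]


theorem convert_alt_eq (s : String) :
    convert_alt s = String.ofList (s.toList.map (relabel s.toList)) := by
  unfold convert_alt
  simp only []
  congr 1
  apply List.map_congr_left
  intro c hc
  have hmem : c ∈ PySem.List.dedup s.toList := by
    rw [PySem.List.mem_dedup]; exact hc
  set u := PySem.List.dedup s.toList with hu
  have hnd : u.Nodup := PySem.List.nodup_dedup _
  have hitems : ((PySem.List.enumerate u 0).foldl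
      (fun d ic => d.insert ic.2 (Char.ofNat ((33 + ic.1).toNat))) PySem.Dict.empty).items
      = (PySem.List.enumerate u 0).map (fun ic => (ic.2, Char.ofNat ((33 + ic.1).toNat))) := by
    rw [PySem.Dict.items_foldl_insert_fresh]
    · simp [PySem.Dict.items, PySem.Dict.empty]
    · intro a _; exact PySem.Dict.contains_empty _
    · rw [PySem.List.map_snd_enumerate]; exact hnd
  have hkeysnd : ((PySem.List.enumerate u 0).foldl
      (fun d ic => d.insert ic.2 (Char.ofNat ((33 + ic.1).toNat))) PySem.Dict.empty).keys.Nodup := by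
    have hkeys : ((PySem.List.enumerate u 0).foldl
        (fun d ic => d.insert ic.2 (Char.ofNat ((33 + ic.1).toNat))) PySem.Dict.empty).keys = u := by
      simp only [PySem.Dict.keys, hitems, List.map_map]
      rw [show ((fun x : Char × Char => x.1) ∘ fun ic : Int × Char =>
        (ic.2, Char.ofNat ((33 + ic.1).toNat))) = (fun ic : Int × Char => ic.2) from rfl]
      exact PySem.List.map_snd_enumerate _ _
    rw [hkeys]; exact hnd
  have hj : u.idxOf c < u.length := List.idxOf_lt_length_of_mem hmem
  have hpair : (c, Char.ofNat (33 + u.idxOf c)) ∈ (PySem.List.enumerate u 0).map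
      (fun ic => (ic.2, Char.ofNat ((33 + ic.1).toNat))) := by
    refine List.mem_map.mpr ⟨((u.idxOf c : Int), c), ?_, ?_⟩
    · rw [PySem.List.mem_enumerate_iff]
      exact ⟨u.idxOf c, hj, by simp [List.getElem_idxOf]⟩
    · have h33 : ((33 : Int) + (u.idxOf c : Int)).toNat = 33 + u.idxOf c := by omega
      simp [h33]
  have hget : ((PySem.List.enumerate u 0).foldl
      (fun d ic => d.insert ic.2 (Char.ofNat ((33 + ic.1).toNat))) PySem.Dict.empty).get? c
      = some (Char.ofNat (33 + u.idxOf c)) := by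
    exact PySem.Dict.get?_of_mem_items _ (by rw [hitems]; exact hpair) hkeysnd
  rw [hget]
  rfl

-- ===== VERDICT (by name: the statement is the Claim_ definition above) =====
theorem convert_spec : Claim_equal_convert := by
  intro s _
  unfold Spec_convert
  rw [convert_eq, convert_alt_eq]
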